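-- pv_equiv track=rewrite | github.com/ZhiliShen/Programmer-Code-Interview-Guide | 递归和动态规划/子数组异或和为0的最多划分/test.py | dynamic_programming
-- ===== SOURCE A (Python) =====
-- from typing import List
--
-- def dynamic_programming(array: List[int]):
--     n = len(array)
--     if n == 0:
--         return 0
--     dp = [0 for i in range(n)]
--     dictionary = {0: -1}
--     # base case
--     if array[0] == 0:
--         dp[0] = 1
--     else:
--         dp[0] = 0
--     dictionary[array[0]] = 0
--
--     # transfer equation
--     xor_sum = array[0]
--     for i in range(1, n):
--         xor_sum = xor_sum ^ array[i]
--         index = dictionary.get(xor_sum, None)  # 这里不能写dictionary.get(xor_sum, False) 因为False等价于0 而如果键对应的值是0 就会产生歧义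
--         if index is not None:
--             dp[i] = dp[index] + 1 if index != -1 else 1
--         else:
--             dp[i] = 0
--         dictionary[xor_sum] = i
--         dp[i] = max(dp[i - 1], dp[i])
--
--     return dp[n - 1]
-- ===== SOURCE B (Python) =====
-- from typing import List
--
-- def dynamic_programming(array: List[int]):
--     prefix = 0
--     seen = {0}
--     count = 0
--     for x in array:
--         prefix ^= x
--         if prefix in seen:
--             count += 1
--             seen = {prefix}
--         else:
--             seen.add(prefix)
--     return count
-- ===== Notes on version B (the rewrite author's own statement) =====
-- stated objective: simpler
-- what changed: Replaced the dp-array + last-index hashmap recurrence with a one-pass greedy earliest-cut scan keeping only a running prefix xor, a set of prefix values seen since the last cut, and a counter.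
import Mathlib
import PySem

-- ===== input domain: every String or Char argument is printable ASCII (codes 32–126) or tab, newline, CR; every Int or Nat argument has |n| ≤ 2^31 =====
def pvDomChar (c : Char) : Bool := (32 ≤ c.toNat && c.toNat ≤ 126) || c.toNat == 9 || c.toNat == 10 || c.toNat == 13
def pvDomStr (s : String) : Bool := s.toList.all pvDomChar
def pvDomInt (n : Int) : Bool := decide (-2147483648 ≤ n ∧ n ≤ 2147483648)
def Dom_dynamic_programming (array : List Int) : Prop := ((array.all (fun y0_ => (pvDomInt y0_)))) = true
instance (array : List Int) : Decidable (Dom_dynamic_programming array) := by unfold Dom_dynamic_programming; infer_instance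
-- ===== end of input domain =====

-- B replaces A's dp-array + last-index hashmap with a greedy earliest-cut scan (running prefix
-- xor, set of prefixes seen since the last cut, counter): simpler state, same O(n) cost.

-- ===== PORT A =====
-- base case of A: dp = [0]*n, dictionary = {0: -1}, dp[0], dictionary[array[0]] = 0, xor_sum = array[0]
def aInit (array : List Int) : List Int × PySem.Dict Int Int × Int :=
  let dp : List Int := (PySem.List.pyRange 0 (array.length : Int) 1).map (fun _ => 0)
  let dict : PySem.Dict Int Int := (PySem.Dict.empty).insert 0 (-1)
  let a0 := PySem.List.pyGetD array 0 0
  let dp := PySem.List.pySetD dp 0 (if a0 = 0 then 1 else 0)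
  let dict := dict.insert a0 0
  (dp, dict, a0)

-- one iteration of A's 'for i in range(1, n)' loop, state (dp, dictionary, xor_sum)
def aStep (array : List Int) (st : List Int × PySem.Dict Int Int × Int) (i : Int) :
    List Int × PySem.Dict Int Int × Int :=
  let dp := st.1
  let dict := st.2.1
  let xor_sum := PySem.Int.bxor st.2.2 (PySem.List.pyGetD array i 0)
  -- index = dictionary.get(xor_sum, None); dp[i] = dp[index] + 1 if index != -1 else 1 / else 0
  let v : Int := match dict.get? xor_sum with
    | some index => if index ≠ -1 then PySem.List.pyGetD dp index 0 + 1 else 1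
    | none => 0
  let dp := PySem.List.pySetD dp i v
  let dict := dict.insert xor_sum i
  -- dp[i] = max(dp[i - 1], dp[i])
  let dp := PySem.List.pySetD dp i (max (PySem.List.pyGetD dp (i - 1) 0) (PySem.List.pyGetD dp i 0))
  (dp, dict, xor_sum)

def dynamic_programming (array : List Int) : Int :=
  if array.length = 0 then 0
  else
    let st := (PySem.List.pyRange 1 (array.length : Int) 1).foldl (aStep array) (aInit array)
    PySem.List.pyGetD st.1 ((array.length : Int) - 1) 0

-- ===== PORT B =====
-- one iteration of B's loop, state (prefix, seen, count)
def bStep (st : Int × PySem.Set Int × Int) (x : Int) : Int × PySem.Set Int × Int :=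
  let p := PySem.Int.bxor st.1 x
  if p ∈ st.2.1 then (p, PySem.Set.ofList [p], st.2.2 + 1)
  else (p, PySem.Set.add st.2.1 p, st.2.2)

def dynamic_programming_alt (array : List Int) : Int :=
  (array.foldl bStep (0, PySem.Set.ofList [0], 0)).2.2

-- ===== PRECONDITION & SPEC =====
def Spec_dynamic_programming (array : List Int) (out : Int) : Prop := out = dynamic_programming_alt array
instance (array : List Int) (out : Int) : Decidable (Spec_dynamic_programming array out) := by unfold Spec_dynamic_programming; infer_instance

-- ===== CLAIM (what is proved, stated in full; the proofs are below) =====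
def Claim_equal_dynamic_programming : Prop := ∀ (array : List Int), Dom_dynamic_programming array → Spec_dynamic_programming array (dynamic_programming array)

-- ===== LEMMAS AND PROOFS =====

-- A's loop state after processing array[0..k-1] (k ≥ 1)
def aFold (array : List Int) (k : Nat) : List Int × PySem.Dict Int Int × Int :=
  (PySem.List.pyRange 1 (k : Int) 1).foldl (aStep array) (aInit array)

-- B's loop state after processing array[0..k-1]
def bFold (array : List Int) (k : Nat) : Int × PySem.Set Int × Int :=
  (array.take k).foldl bStep (0, PySem.Set.ofList [0], 0)

-- the coupling invariant between A's state and B's state after k elements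
def InvAB (array : List Int) (k : Nat) : Prop :=
  let dp := (aFold array k).1
  let dict := (aFold array k).2.1
  let S := (bFold array k).2.1
  let c := (bFold array k).2.2
  (aFold array k).2.2 = (bFold array k).1 ∧
  dp.length = array.length ∧
  0 ≤ c ∧
  (bFold array k).1 ∈ S ∧
  dp.getD (k - 1) 0 = c ∧
  (∀ x ∈ S, (dict.get? x).isSome = true) ∧
  (∀ x j, dict.get? x = some j →
     -1 ≤ j ∧ j < (k : Int) ∧
     (j = -1 → x = 0 ∧ (x ∈ S → c = 0) ∧ (x ∉ S → 1 ≤ c)) ∧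
     (0 ≤ j → (x ∈ S → dp.getD j.toNat 0 = c) ∧ (x ∉ S → dp.getD j.toNat 0 + 1 ≤ c)))

-- small getD/set facts used throughout
lemma getD_set_self (l : List Int) (n : Nat) (v d : Int) (h : n < l.length) :
    (l.set n v).getD n d = v := by
  simp [List.getD_eq_getElem?_getD, h]

lemma getD_set_ne (l : List Int) (n m : Nat) (v d : Int) (h : n ≠ m) :
    (l.set n v).getD m d = l.getD m d := by
  simp [List.getD_eq_getElem?_getD, List.getElem?_set_ne h]

lemma zeros_eq (n : Nat) :
    (PySem.List.pyRange 0 (n : Int) 1).map (fun _ => (0:Int)) = List.replicate n 0 := by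
  apply List.eq_replicate_iff.2
  constructor
  · simp [PySem.List.length_pyRange_one]
  · intro b hb
    simp at hb
    omega

lemma aInit_eq (a0 : Int) (rest : List Int) :
    aInit (a0 :: rest) = ((if a0 = 0 then (1:Int) else 0) :: List.replicate rest.length 0,
      (PySem.Dict.empty.insert 0 (-1)).insert a0 0, a0) := by
  unfold aInit
  simp only [PySem.List.pyGetD_zero_cons, List.length_cons]
  rw [zeros_eq]
  rw [show (0:Int) = ((0:Nat):Int) from rfl, PySem.List.pySetD_natCast]
  simp [List.replicate_succ]

lemma aFold_one (array : List Int) : aFold array 1 = aInit array := by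
  unfold aFold
  rw [PySem.List.pyRange_one_eq_nil (by norm_num)]
  rfl

lemma aFold_succ (array : List Int) (k : Nat) (h1 : 1 ≤ k) :
    aFold array (k + 1) = aStep array (aFold array k) (k : Int) := by
  unfold aFold
  rw [show ((k + 1 : Nat) : Int) = (k : Int) + 1 by push_cast; ring]
  rw [PySem.List.pyRange_one_succ_right (by exact_mod_cast h1), List.foldl_append]
  rfl

lemma bFold_succ (array : List Int) (k : Nat) (hk : k < array.length) :
    bFold array (k + 1) = bStep (bFold array k) (array.getD k 0) := by
  unfold bFold
  rw [List.take_add_one, List.foldl_append, List.getElem?_eq_getElem hk]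
  simp [List.getD_eq_getElem?_getD, List.getElem?_eq_getElem hk]

lemma bxor_zero_left (a : Int) : PySem.Int.bxor 0 a = a := by
  rw [PySem.Int.bxor_comm]; simp

lemma inv_base (array : List Int) (h : 1 ≤ array.length) : InvAB array 1 := by
  obtain ⟨a0, rest, rfl⟩ : ∃ a0 rest, array = a0 :: rest := by
    cases array with
    | nil => simp at h
    | cons a r => exact ⟨a, r, rfl⟩
  have hb : bFold (a0 :: rest) 1 = bStep (0, PySem.Set.ofList [0], 0) a0 := rfl
  have hbx := bxor_zero_left a0
  unfold InvAB
  rw [aFold_one, aInit_eq, hb]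
  by_cases ha : a0 = 0
  · subst ha
    have hB : bStep (0, PySem.Set.ofList [0], 0) (0:Int) = (0, PySem.Set.ofList [0], 1) := by decide
    rw [hB]
    refine ⟨rfl, by simp, by norm_num, by decide, by norm_num, ?_, ?_⟩
    · intro x hx
      simp [PySem.Set.mem_ofList] at hx
      subst hx
      simp [PySem.Dict.get?_insert_self]
    · intro x j hj
      rw [PySem.Dict.insert_insert_self, PySem.Dict.get?_insert] at hj
      split_ifs at hj with hx0
      · subst hx0
        cases hj
        refine ⟨by norm_num, by norm_num, by norm_num, ?_⟩
        intro _
        refine ⟨fun _ => rfl, fun hxn => absurd (by decide) hxn⟩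
      · simp [PySem.Dict.get?_empty] at hj
  · have hnm : (PySem.Int.bxor 0 a0) ∉ PySem.Set.ofList [(0:Int)] := by
      simp [hbx, PySem.Set.mem_ofList]; exact ha
    have hB : bStep (0, PySem.Set.ofList [0], 0) a0 = (a0, [0, a0], 0) := by
      simp only [bStep, if_neg hnm]
      rw [PySem.Set.add_of_not_mem hnm]
      simp [hbx]
      rfl
    rw [hB, if_neg ha]
    refine ⟨rfl, by simp, le_refl 0, by simp, by simp, ?_, ?_⟩
    · intro x hx
      simp at hx
      dsimp only
      rcases hx with rfl | rfl
      · rw [PySem.Dict.get?_insert_of_ne _ _ (Ne.symm ha)]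
        simp [PySem.Dict.get?_insert_self]
      · simp [PySem.Dict.get?_insert_self]
    · intro x j hj
      dsimp only at hj ⊢
      rw [PySem.Dict.get?_insert] at hj
      split_ifs at hj with hxa
      · subst hxa
        cases hj
        refine ⟨by norm_num, by norm_num, by norm_num, ?_⟩
        intro _
        refine ⟨fun _ => by simp, fun hxn => absurd (by simp) hxn⟩
      · rw [PySem.Dict.get?_insert] at hj
        split_ifs at hj with hx0
        · subst hx0
          cases hj
          refine ⟨by norm_num, by norm_num, ?_, by norm_num⟩
          intro _
          exact ⟨rfl, fun _ => rfl, fun hxn => absurd (by simp) hxn⟩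
        · simp [PySem.Dict.get?_empty] at hj

-- the value A assigns to dp[i] before the running max
def aVal (dp : List Int) (dict : PySem.Dict Int Int) (p2 : Int) : Int :=
  match dict.get? p2 with
  | some index => if index ≠ -1 then PySem.List.pyGetD dp index 0 + 1 else 1
  | none => 0

lemma aStep_eq (array : List Int) (dp : List Int) (dict : PySem.Dict Int Int) (p : Int)
    (k : Nat) (h1 : 1 ≤ k) (hklt : k < dp.length) :
    aStep array (dp, dict, p) (k : Int) =
      (dp.set k (max (dp.getD (k - 1) 0) (aVal dp dict (PySem.Int.bxor p (array.getD k 0)))),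
       dict.insert (PySem.Int.bxor p (array.getD k 0)) (k : Int),
       PySem.Int.bxor p (array.getD k 0)) := by
  unfold aStep aVal
  dsimp only
  simp only [PySem.List.pyGetD_natCast, PySem.List.pySetD_natCast]
  rw [show ((k:Int) - 1) = ((k - 1 : Nat) : Int) by omega]
  simp only [PySem.List.pyGetD_natCast]
  rw [getD_set_ne _ _ _ _ _ (by omega), getD_set_self _ _ _ _ hklt, List.set_set]

lemma inv_step (array : List Int) (k : Nat) (h1 : 1 ≤ k) (hk : k < array.length)
    (ih : InvAB array k) : InvAB array (k + 1) := by
  rcases hA : aFold array k with ⟨dp, dict, p⟩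
  rcases hB : bFold array k with ⟨q, S, c⟩
  unfold InvAB at ih
  rw [hA, hB] at ih
  obtain ⟨hpq, hlen, hc0, hqS, hdpk, hsome, hdict⟩ := ih
  dsimp only at hpq hlen hc0 hqS hdpk hsome hdict
  subst hpq
  unfold InvAB
  rw [aFold_succ array k h1, bFold_succ array k hk, hA, hB,
      aStep_eq array dp dict p k h1 (by omega), hdpk]
  set x := array.getD k 0 with hx
  set p2 := PySem.Int.bxor p x with hp2
  have hklt : k < dp.length := by omega
  by_cases hmem : p2 ∈ S
  · -- a zero-xor block ends here: both sides count one more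
    obtain ⟨j, hj⟩ : ∃ j, dict.get? p2 = some j := by
      have := hsome p2 hmem
      cases hg : dict.get? p2 with
      | none => rw [hg] at this; simp at this
      | some j => exact ⟨j, rfl⟩
    obtain ⟨hb1, hb2, hbneg, hbpos⟩ := hdict p2 j hj
    have hval : aVal dp dict p2 = c + 1 := by
      unfold aVal
      rw [hj]
      by_cases hjm : j = -1
      · obtain ⟨-, hc, -⟩ := hbneg hjm
        simp [hjm, hc hmem]
      · have hj0 : 0 ≤ j := by omega
        dsimp only
        rw [if_pos hjm, PySem.List.pyGetD_of_nonneg _ _ hj0, (hbpos hj0).1 hmem]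
    have hmax : max c (c + 1) = c + 1 := by omega
    have hBnew : bStep (p, S, c) x = (p2, [p2], c + 1) := by
      unfold bStep
      rw [← hp2, if_pos hmem]
      rfl
    rw [hval, hmax, hBnew]
    dsimp only
    refine ⟨rfl, by simpa using hlen, by omega, by simp, ?_, ?_, ?_⟩
    · dsimp only
      simpa using getD_set_self dp k (c + 1) 0 hklt
    · intro y hy
      simp at hy
      subst hy
      simp [PySem.Dict.get?_insert_self]
    · intro y j' hj'
      rw [PySem.Dict.get?_insert] at hj'
      split_ifs at hj' with hyp2
      · subst hyp2
        cases hj'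
        refine ⟨by omega, by omega, by omega, ?_⟩
        intro _
        constructor
        · intro _
          rw [Int.toNat_natCast]
          exact getD_set_self dp k (c + 1) 0 hklt
        · intro hyn
          exact absurd (by simp) hyn
      · obtain ⟨hb1', hb2', hbneg', hbpos'⟩ := hdict y j' hj'
        refine ⟨by omega, by omega, ?_, ?_⟩
        · intro hjm
          obtain ⟨hy0, -, -⟩ := hbneg' hjm
          refine ⟨hy0, ?_, by omega⟩
          intro hm
          simp at hm
          exact absurd hm hyp2
        · intro hj0
          have hne : k ≠ j'.toNat := by omega
          rw [getD_set_ne _ _ _ _ _ hne]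
          constructor
          · intro hm
            simp at hm
            exact absurd hm hyp2
          · intro _
            by_cases hyS : y ∈ S
            · rw [(hbpos' hj0).1 hyS]
            · have := (hbpos' hj0).2 hyS; omega
  · -- no cut: A's candidate value cannot beat dp[i-1]
    have hval : aVal dp dict p2 ≤ c := by
      unfold aVal
      cases hg : dict.get? p2 with
      | none => exact hc0
      | some j =>
        obtain ⟨hb1, hb2, hbneg, hbpos⟩ := hdict p2 j hg
        by_cases hjm : j = -1
        · obtain ⟨-, -, hc1⟩ := hbneg hjm
          simp [hjm]
          exact hc1 hmem
        · have hj0 : 0 ≤ j := by omega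
          dsimp only
          rw [if_pos hjm, PySem.List.pyGetD_of_nonneg _ _ hj0]
          exact (hbpos hj0).2 hmem
    have hmax : max c (aVal dp dict p2) = c := by omega
    have hBnew : bStep (p, S, c) x = (p2, S ++ [p2], c) := by
      unfold bStep
      rw [← hp2, if_neg hmem, PySem.Set.add_of_not_mem hmem]
    rw [hmax, hBnew]
    dsimp only
    refine ⟨rfl, by simpa using hlen, hc0, by simp, ?_, ?_, ?_⟩
    · dsimp only
      simpa using getD_set_self dp k c 0 hklt
    · intro y hy
      simp at hy
      by_cases hyp2 : y = p2
      · subst hyp2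
        simp [PySem.Dict.get?_insert_self]
      · rw [PySem.Dict.get?_insert_of_ne _ _ hyp2]
        rcases hy with hy | hy
        · exact hsome y hy
        · exact absurd hy hyp2
    · intro y j' hj'
      rw [PySem.Dict.get?_insert] at hj'
      split_ifs at hj' with hyp2
      · subst hyp2
        cases hj'
        refine ⟨by omega, by omega, by omega, ?_⟩
        intro _
        constructor
        · intro _
          rw [Int.toNat_natCast]
          exact getD_set_self dp k c 0 hklt
        · intro hyn
          exact absurd (by simp) hyn
      · obtain ⟨hb1', hb2', hbneg', hbpos'⟩ := hdict y j' hj'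
        have hySiff : (y ∈ S ++ [p2]) ↔ y ∈ S := by simp [hyp2]
        refine ⟨by omega, by omega, ?_, ?_⟩
        · intro hjm
          obtain ⟨hy0, hcin, hcout⟩ := hbneg' hjm
          exact ⟨hy0, fun hm => hcin (hySiff.1 hm), fun hm => hcout (fun hs => hm (hySiff.2 hs))⟩
        · intro hj0
          have hne : k ≠ j'.toNat := by omega
          rw [getD_set_ne _ _ _ _ _ hne]
          exact ⟨fun hm => (hbpos' hj0).1 (hySiff.1 hm), fun hm => (hbpos' hj0).2 (fun hs => hm (hySiff.2 hs))⟩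

lemma inv_all (array : List Int) (k : Nat) (h1 : 1 ≤ k) (hk : k ≤ array.length) :
    InvAB array k := by
  induction k with
  | zero => omega
  | succ m ih =>
    rcases Nat.eq_or_lt_of_le h1 with h | h
    · exact h ▸ inv_base array (by omega)
    · exact inv_step array m (by omega) (by omega) (ih (by omega) (by omega))

-- ===== VERDICT (by name: the statement is the Claim_ definition above) =====
theorem dynamic_programming_spec : Claim_equal_dynamic_programming := by
  intro array _
  show _ = _
  by_cases hn : array.length = 0
  · simp [dynamic_programming, dynamic_programming_alt, List.eq_nil_of_length_eq_zero hn]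
  · have h1 : 1 ≤ array.length := by omega
    have H := inv_all array array.length h1 le_rfl
    obtain ⟨_, hlen, _, _, hdp, _, _⟩ := H
    have htake : array.take array.length = array := List.take_length
    simp only [dynamic_programming, dynamic_programming_alt, hn, if_false]
    have : PySem.List.pyGetD (aFold array array.length).1 ((array.length : Int) - 1) 0
        = (aFold array array.length).1.getD (array.length - 1) 0 := by
      rw [show ((array.length : Int) - 1) = ((array.length - 1 : Nat) : Int) by omega]
      simp [PySem.List.pyGetD_natCast]
    rw [show ((PySem.List.pyRange 1 (array.length : Int) 1).foldl (aStep array) (aInit array)) = aFold array array.length from rfl]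
    rw [this, hdp]
    unfold bFold at *
    rw [htake]
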